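-- pv_equiv track=rewrite | github.com/brk-a/DSA | 0x01_dsa/47-minimum_increment_ops_elems_odd_even.py | minimum_increment_ops_elems_odd_even_brute_force
-- ===== SOURCE A (Python) =====
-- def minimum_increment_ops_elems_odd_even_brute_force(nums: list[int]) -> int:
--     if not isinstance(nums, list) or len(nums) == 0:
--         return -1
--
--     n = len(nums)
--     result = 0
--
--     for i in range(n):
--         even_sum, odd_sum = 0, 0
--         idx = 0
--
--         for j in range(n):
--             if j == i:
--                 continue
--
--             if idx % 2 == 0:
--                 even_sum += nums[j]
--             else:
--                 odd_sum += nums[j]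
--             idx += 1
--
--         if even_sum == odd_sum:
--             result += 1
--
--     return result
-- ===== SOURCE B (Python) =====
-- def minimum_increment_ops_elems_odd_even_brute_force(nums: list[int]) -> int:
--     if not isinstance(nums, list) or len(nums) == 0:
--         return -1
--
--     tot_even, tot_odd = 0, 0
--     for k, x in enumerate(nums):
--         if k % 2 == 0:
--             tot_even += x
--         else:
--             tot_odd += x
--
--     result = 0
--     pre_even, pre_odd = 0, 0
--     for k, x in enumerate(nums):
--         if k % 2 == 0:
--             even = pre_even + (tot_odd - pre_odd)
--             odd = pre_odd + (tot_even - pre_even - x)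
--             pre_even += x
--         else:
--             even = pre_even + (tot_odd - pre_odd - x)
--             odd = pre_odd + (tot_even - pre_even)
--             pre_odd += x
--         if even == odd:
--             result += 1
--     return result
-- ===== Notes on version B (the rewrite author's own statement) =====
-- stated objective: faster
-- what changed: Replaced the O(n^2) re-simulation of the alternating sum for every removed index by a single O(n) pass that uses prefix even/odd sums plus the list totals (removing index i flips the even/odd role of every later element).
import Mathlib
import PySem

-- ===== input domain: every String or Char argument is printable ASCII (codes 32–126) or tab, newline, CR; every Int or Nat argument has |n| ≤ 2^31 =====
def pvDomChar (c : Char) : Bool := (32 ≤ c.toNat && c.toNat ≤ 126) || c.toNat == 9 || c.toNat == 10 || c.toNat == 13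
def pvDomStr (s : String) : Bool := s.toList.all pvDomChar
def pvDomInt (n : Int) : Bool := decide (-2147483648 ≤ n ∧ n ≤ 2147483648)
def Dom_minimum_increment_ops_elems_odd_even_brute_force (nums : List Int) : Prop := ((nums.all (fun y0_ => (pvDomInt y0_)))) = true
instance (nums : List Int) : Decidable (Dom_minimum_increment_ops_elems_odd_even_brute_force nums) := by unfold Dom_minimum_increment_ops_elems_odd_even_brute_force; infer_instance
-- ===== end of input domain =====

-- B replaces A's O(n^2) double loop by a single O(n) pass using prefix even/odd sums
-- and the totals (removal flips the parity of every element after the removed index).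

-- ===== PORT A =====
def minimum_increment_ops_elems_odd_even_brute_force (nums : List Int) : Int :=
  if nums.length = 0 then -1
  else
    let n : Int := nums.length
    (PySem.List.pyRange 0 n 1).foldl (fun result i =>
      let st := (PySem.List.pyRange 0 n 1).foldl (fun (s : Int × Int × Int) j =>
        if j = i then s
        else if PySem.Int.mod s.2.2 2 = 0 then (s.1 + PySem.List.pyGetD nums j 0, s.2.1, s.2.2 + 1)
        else (s.1, s.2.1 + PySem.List.pyGetD nums j 0, s.2.2 + 1)) ((0 : Int), (0 : Int), (0 : Int))
      if st.1 = st.2.1 then result + 1 else result) 0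

-- ===== PORT B =====
def minimum_increment_ops_elems_odd_even_brute_force_alt (nums : List Int) : Int :=
  if nums.length = 0 then -1
  else
    let tots := (PySem.List.enumerate nums 0).foldl (fun (t : Int × Int) kx =>
      if PySem.Int.mod kx.1 2 = 0 then (t.1 + kx.2, t.2) else (t.1, t.2 + kx.2)) ((0 : Int), (0 : Int))
    let st := (PySem.List.enumerate nums 0).foldl (fun (s : Int × Int × Int) kx =>
      if PySem.Int.mod kx.1 2 = 0 then
        ((if s.2.1 + (tots.2 - s.2.2) = s.2.2 + (tots.1 - s.2.1 - kx.2) then s.1 + 1 else s.1),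
          s.2.1 + kx.2, s.2.2)
      else
        ((if s.2.1 + (tots.2 - s.2.2 - kx.2) = s.2.2 + (tots.1 - s.2.1) then s.1 + 1 else s.1),
          s.2.1, s.2.2 + kx.2)) ((0 : Int), (0 : Int), (0 : Int))
    st.1

-- ===== PRECONDITION & SPEC =====
def Spec_minimum_increment_ops_elems_odd_even_brute_force (nums : List Int) (out : Int) : Prop := out = minimum_increment_ops_elems_odd_even_brute_force_alt nums
instance (nums : List Int) (out : Int) : Decidable (Spec_minimum_increment_ops_elems_odd_even_brute_force nums out) := by unfold Spec_minimum_increment_ops_elems_odd_even_brute_force; infer_instance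

-- ===== CLAIM (what is proved, stated in full; the proofs are below) =====
def Claim_equal_minimum_increment_ops_elems_odd_even_brute_force : Prop := ∀ (nums : List Int), Dom_minimum_increment_ops_elems_odd_even_brute_force nums → Spec_minimum_increment_ops_elems_odd_even_brute_force nums (minimum_increment_ops_elems_odd_even_brute_force nums)

-- ===== LEMMAS AND PROOFS =====

-- (even-position sum, odd-position sum) of a list
def swapAdd : List Int → Int × Int
  | [] => (0, 0)
  | x :: xs => (x + (swapAdd xs).2, (swapAdd xs).1)

-- A's inner-loop step, on an element (skip already removed)
def stepA (s : Int × Int × Int) (x : Int) : Int × Int × Int :=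
  if PySem.Int.mod s.2.2 2 = 0 then (s.1 + x, s.2.1, s.2.2 + 1) else (s.1, s.2.1 + x, s.2.2 + 1)

-- B's loop step with the totals fixed
def stepB (tE tO : Int) (s : Int × Int × Int) (kx : Int × Int) : Int × Int × Int :=
  if PySem.Int.mod kx.1 2 = 0 then
    ((if s.2.1 + (tO - s.2.2) = s.2.2 + (tE - s.2.1 - kx.2) then s.1 + 1 else s.1),
      s.2.1 + kx.2, s.2.2)
  else
    ((if s.2.1 + (tO - s.2.2 - kx.2) = s.2.2 + (tE - s.2.1) then s.1 + 1 else s.1),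
      s.2.1, s.2.2 + kx.2)

-- B's balance test at index k, phrased on the input only
def predQ (nums : List Int) (tE tO : Int) (k : Nat) : Bool :=
  if k % 2 = 0 then
    decide ((swapAdd (nums.take k)).1 + (tO - (swapAdd (nums.take k)).2)
      = (swapAdd (nums.take k)).2 + (tE - (swapAdd (nums.take k)).1 - nums.getD k 0))
  else
    decide ((swapAdd (nums.take k)).1 + (tO - (swapAdd (nums.take k)).2 - nums.getD k 0)
      = (swapAdd (nums.take k)).2 + (tE - (swapAdd (nums.take k)).1))

lemma swapAdd_concat (l : List Int) (x : Int) :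
    swapAdd (l ++ [x]) = if l.length % 2 = 0 then ((swapAdd l).1 + x, (swapAdd l).2)
      else ((swapAdd l).1, (swapAdd l).2 + x) := by
  induction l with
  | nil => simp [swapAdd]
  | cons y l ih =>
    simp only [List.cons_append, swapAdd, ih, List.length_cons]
    by_cases h : l.length % 2 = 0
    · rw [if_pos h, if_neg (show ¬(l.length + 1) % 2 = 0 by omega)]
    · rw [if_neg h, if_pos (show (l.length + 1) % 2 = 0 by omega)]
      simp [Prod.mk.injEq]
      try and_intros <;> ring

lemma swapAdd_append (a b : List Int) :
    swapAdd (a ++ b) = if a.length % 2 = 0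
      then ((swapAdd a).1 + (swapAdd b).1, (swapAdd a).2 + (swapAdd b).2)
      else ((swapAdd a).1 + (swapAdd b).2, (swapAdd a).2 + (swapAdd b).1) := by
  induction a with
  | nil => simp [swapAdd]
  | cons y a ih =>
    simp only [List.cons_append, swapAdd, ih, List.length_cons]
    by_cases h : a.length % 2 = 0
    · rw [if_pos h, if_neg (show ¬(a.length + 1) % 2 = 0 by omega)]
      simp [Prod.mk.injEq]
      try and_intros <;> ring
    · rw [if_neg h, if_pos (show (a.length + 1) % 2 = 0 by omega)]
      simp [Prod.mk.injEq]
      try and_intros <;> ring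

lemma foldl_range'_getD {β : Type} (g : β → Int → β) (xs : List Int) :
    ∀ (m a : Nat) (s : β), a + m ≤ xs.length →
      (List.range' a m).foldl (fun s j => g s (xs.getD j 0)) s = ((xs.drop a).take m).foldl g s := by
  intro m
  induction m with
  | zero => intro a s _; simp
  | succ m ih =>
    intro a s h
    have ha : a < xs.length := by omega
    rw [List.range'_succ, List.drop_eq_getElem_cons ha]
    simp only [List.foldl_cons, List.take_succ_cons, List.getD_eq_getElem xs 0 ha]
    exact ih (a + 1) (g s xs[a]) (by omega)

lemma foldl_skip_eraseIdx {β : Type} (g : β → Int → β) (xs : List Int) (iN : Nat)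
    (hi : iN < xs.length) (s0 : β) :
    (List.range xs.length).foldl (fun s j => if j = iN then s else g s (xs.getD j 0)) s0
      = (xs.eraseIdx iN).foldl g s0 := by
  have hsplit : List.range xs.length
      = List.range' 0 iN ++ (iN :: List.range' (iN + 1) (xs.length - iN - 1)) := by
    rw [List.range_eq_range']
    have h1 : List.range' iN (xs.length - iN) = iN :: List.range' (iN + 1) (xs.length - iN - 1) := by
      conv_lhs => rw [show xs.length - iN = (xs.length - iN - 1) + 1 by omega]
      rw [List.range'_succ]
    rw [← h1]
    have h2 := @List.range'_append 0 iN (xs.length - iN) 1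
    simp only [Nat.one_mul, Nat.zero_add] at h2
    rw [h2]
    congr 1
    omega
  rw [hsplit, List.foldl_append, List.foldl_cons, if_pos rfl]
  have c1 : (List.range' 0 iN).foldl (fun s j => if j = iN then s else g s (xs.getD j 0)) s0
      = (List.range' 0 iN).foldl (fun s j => g s (xs.getD j 0)) s0 := by
    apply PySem.List.foldl_congr_mem
    intro acc x hx
    have hxlt : x < iN := by
      have := List.mem_range'_1.mp hx
      omega
    simp [Nat.ne_of_lt hxlt]
  rw [c1, foldl_range'_getD g xs iN 0 s0 (by omega)]
  simp only [List.drop_zero]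
  have c2 : (List.range' (iN + 1) (xs.length - iN - 1)).foldl
        (fun s j => if j = iN then s else g s (xs.getD j 0)) ((xs.take iN).foldl g s0)
      = (List.range' (iN + 1) (xs.length - iN - 1)).foldl (fun s j => g s (xs.getD j 0))
        ((xs.take iN).foldl g s0) := by
    apply PySem.List.foldl_congr_mem
    intro acc x hx
    have hxm := List.mem_range'_1.mp hx
    have hne : x ≠ iN := by omega
    simp [hne]
  rw [c2, foldl_range'_getD g xs (xs.length - iN - 1) (iN + 1) ((xs.take iN).foldl g s0) (by omega)]
  have htk : (xs.drop (iN + 1)).take (xs.length - iN - 1) = xs.drop (iN + 1) := by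
    apply List.take_of_length_le
    simp only [List.length_drop]
    omega
  rw [htk, List.eraseIdx_eq_take_drop_succ, List.foldl_append]

lemma stepA_fold (l : List Int) : ∀ (e o idx : Int),
    l.foldl stepA (e, o, idx)
      = (if idx % 2 = 0 then (e + (swapAdd l).1, o + (swapAdd l).2, idx + l.length)
         else (e + (swapAdd l).2, o + (swapAdd l).1, idx + l.length)) := by
  induction l with
  | nil => intro e o idx; split <;> simp [swapAdd]
  | cons x l ih =>
    intro e o idx
    have hm : PySem.Int.mod idx 2 = idx % 2 := PySem.Int.mod_eq_emod_of_pos (by omega)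
    rw [List.foldl_cons]
    by_cases h : idx % 2 = 0
    · rw [show stepA (e, o, idx) x = (e + x, o, idx + 1) from by simp [stepA, hm, h]]
      rw [ih, if_neg (show ¬(idx + 1) % 2 = 0 by omega), if_pos h]
      simp [swapAdd, Prod.mk.injEq]
      try push_cast
      try and_intros <;> ring
    · rw [show stepA (e, o, idx) x = (e, o + x, idx + 1) from by simp [stepA, hm, h]]
      rw [ih, if_pos (show (idx + 1) % 2 = 0 by omega), if_neg h]
      simp [swapAdd, Prod.mk.injEq]
      try push_cast
      try and_intros <;> ring

lemma tots_fold (l : List Int) : ∀ (s tE tO : Int),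
    (PySem.List.enumerate l s).foldl (fun (t : Int × Int) kx =>
        if PySem.Int.mod kx.1 2 = 0 then (t.1 + kx.2, t.2) else (t.1, t.2 + kx.2)) (tE, tO)
      = (if s % 2 = 0 then (tE + (swapAdd l).1, tO + (swapAdd l).2)
         else (tE + (swapAdd l).2, tO + (swapAdd l).1)) := by
  induction l with
  | nil => intro s tE tO; split <;> simp [PySem.List.enumerate, swapAdd]
  | cons x l ih =>
    intro s tE tO
    have hm : PySem.Int.mod s 2 = s % 2 := PySem.Int.mod_eq_emod_of_pos (by omega)
    rw [PySem.List.enumerate_cons, List.foldl_cons]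
    by_cases h : s % 2 = 0
    · rw [show (if PySem.Int.mod ((s, x) : Int × Int).1 2 = 0
          then (((tE, tO) : Int × Int).1 + ((s, x) : Int × Int).2, ((tE, tO) : Int × Int).2)
          else (((tE, tO) : Int × Int).1, ((tE, tO) : Int × Int).2 + ((s, x) : Int × Int).2))
          = ((tE + x, tO) : Int × Int) from by simp [hm, h]]
      rw [ih, if_neg (show ¬(s + 1) % 2 = 0 by omega), if_pos h]
      simp [swapAdd, Prod.mk.injEq]
      try and_intros <;> ring
    · rw [show (if PySem.Int.mod ((s, x) : Int × Int).1 2 = 0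
          then (((tE, tO) : Int × Int).1 + ((s, x) : Int × Int).2, ((tE, tO) : Int × Int).2)
          else (((tE, tO) : Int × Int).1, ((tE, tO) : Int × Int).2 + ((s, x) : Int × Int).2))
          = ((tE, tO + x) : Int × Int) from by simp [hm, h]]
      rw [ih, if_pos (show (s + 1) % 2 = 0 by omega), if_neg h]
      simp [swapAdd, Prod.mk.injEq]
      try and_intros <;> ring

lemma B_fold (nums : List Int) (tE tO : Int) :
    ∀ (m k : Nat), k + m = nums.length → ∀ (r : Int),
      ((PySem.List.enumerate (nums.drop k) k).foldl (stepB tE tO)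
          (r, (swapAdd (nums.take k)).1, (swapAdd (nums.take k)).2)).1
        = r + ((List.range' k m).countP (predQ nums tE tO) : Nat) := by
  intro m
  induction m with
  | zero =>
    intro k hk r
    rw [List.drop_of_length_le (by omega)]
    simp [PySem.List.enumerate]
  | succ m ih =>
    intro k hk r
    have hkl : k < nums.length := by omega
    rw [List.drop_eq_getElem_cons hkl, PySem.List.enumerate_cons, List.foldl_cons]
    have hm : PySem.Int.mod (k : Int) 2 = (k : Int) % 2 := PySem.Int.mod_eq_emod_of_pos (by omega)
    have hpar : ((k : Int) % 2 = 0) ↔ (k % 2 = 0) := by omega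
    have htake : nums.take (k + 1) = nums.take k ++ [nums[k]] := (List.take_concat_get' nums k hkl).symm
    have hlen : (nums.take k).length = k := by simp [List.length_take]; omega
    have hgd : nums.getD k 0 = nums[k] := List.getD_eq_getElem nums 0 hkl
    rw [List.range'_succ, List.countP_cons]
    by_cases h : k % 2 = 0
    · have hstep : stepB tE tO (r, (swapAdd (nums.take k)).1, (swapAdd (nums.take k)).2) ((k : Int), nums[k])
          = ((if predQ nums tE tO k then r + 1 else r),
             (swapAdd (nums.take (k + 1))).1, (swapAdd (nums.take (k + 1))).2) := by
        rw [htake, swapAdd_concat, hlen]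
        simp only [stepB, hm, predQ, if_pos (hpar.mpr h), if_pos h, hgd]
        simp
      rw [hstep, show ((k : Int) + 1) = (((k + 1 : Nat)) : Int) from by push_cast; ring,
        ih (k + 1) (by omega)]
      by_cases hq : predQ nums tE tO k = true <;> simp [hq] <;> push_cast <;> ring
    · have hstep : stepB tE tO (r, (swapAdd (nums.take k)).1, (swapAdd (nums.take k)).2) ((k : Int), nums[k])
          = ((if predQ nums tE tO k then r + 1 else r),
             (swapAdd (nums.take (k + 1))).1, (swapAdd (nums.take (k + 1))).2) := by
        rw [htake, swapAdd_concat, hlen]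
        simp only [stepB, hm, predQ, if_neg (fun hc => h (hpar.mp hc)), if_neg h, hgd]
        simp
      rw [hstep, show ((k : Int) + 1) = (((k + 1 : Nat)) : Int) from by push_cast; ring,
        ih (k + 1) (by omega)]
      by_cases hq : predQ nums tE tO k = true <;> simp [hq] <;> push_cast <;> ring

lemma pred_eq (nums : List Int) (k : Nat) (hk : k < nums.length) :
    predQ nums (swapAdd nums).1 (swapAdd nums).2 k
      = decide ((swapAdd (nums.eraseIdx k)).1 = (swapAdd (nums.eraseIdx k)).2) := by
  have htake : nums.take (k + 1) = nums.take k ++ [nums[k]] := (List.take_concat_get' nums k hk).symm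
  have hlen : (nums.take k).length = k := by simp [List.length_take]; omega
  have hlen1 : (nums.take (k + 1)).length = k + 1 := by simp [List.length_take]; omega
  have hsplit : nums = nums.take (k + 1) ++ nums.drop (k + 1) := (List.take_append_drop (k + 1) nums).symm
  have herase : nums.eraseIdx k = nums.take k ++ nums.drop (k + 1) := List.eraseIdx_eq_take_drop_succ nums k
  have hgd : nums.getD k 0 = nums[k] := List.getD_eq_getElem nums 0 hk
  set pE := (swapAdd (nums.take k)).1 with hpE
  set pO := (swapAdd (nums.take k)).2 with hpO
  set dE := (swapAdd (nums.drop (k + 1))).1 with hdE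
  set dO := (swapAdd (nums.drop (k + 1))).2 with hdO
  have htot : swapAdd nums = swapAdd (nums.take (k + 1) ++ nums.drop (k + 1)) := by rw [← hsplit]
  rw [swapAdd_append, hlen1] at htot
  rw [htake, swapAdd_concat, hlen] at htot
  have hera : swapAdd (nums.eraseIdx k)
      = if k % 2 = 0 then (pE + dE, pO + dO) else (pE + dO, pO + dE) := by
    rw [herase, swapAdd_append, hlen]
  by_cases h : k % 2 = 0
  · have h1 : (k + 1) % 2 ≠ 0 := by omega
    simp only [if_pos h, if_neg h1] at htot
    simp only [predQ, hera, if_pos h, hgd, htot]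
    simp only [decide_eq_decide]
    constructor <;> intro <;> omega
  · have h1 : (k + 1) % 2 = 0 := by omega
    simp only [if_neg h, if_pos h1] at htot
    simp only [predQ, hera, if_neg h, hgd, htot]
    simp only [decide_eq_decide]
    constructor <;> intro <;> omega

lemma A_eq_count (nums : List Int) (h : nums.length ≠ 0) :
    minimum_increment_ops_elems_odd_even_brute_force nums
      = ((List.range nums.length).countP
          (fun iN => decide ((swapAdd (nums.eraseIdx iN)).1 = (swapAdd (nums.eraseIdx iN)).2)) : Nat) := by
  unfold minimum_increment_ops_elems_odd_even_brute_force
  rw [if_neg h]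
  simp only [PySem.List.pyRange_one, Int.sub_zero, Int.toNat_natCast, List.foldl_map, Int.zero_add]
  have hinner : ∀ (iN : Nat), iN < nums.length →
      (List.range nums.length).foldl (fun (s : Int × Int × Int) (j : Nat) =>
          if (j : Int) = (iN : Int) then s
          else if PySem.Int.mod s.2.2 2 = 0 then (s.1 + PySem.List.pyGetD nums (j : Int) 0, s.2.1, s.2.2 + 1)
          else (s.1, s.2.1 + PySem.List.pyGetD nums (j : Int) 0, s.2.2 + 1)) ((0 : Int), (0 : Int), (0 : Int))
        = (nums.eraseIdx iN).foldl stepA ((0 : Int), (0 : Int), (0 : Int)) := by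
    intro iN hiN
    have hb : ∀ (s : Int × Int × Int), ∀ j ∈ List.range nums.length,
        (if (j : Int) = (iN : Int) then s
         else if PySem.Int.mod s.2.2 2 = 0 then (s.1 + PySem.List.pyGetD nums (j : Int) 0, s.2.1, s.2.2 + 1)
         else (s.1, s.2.1 + PySem.List.pyGetD nums (j : Int) 0, s.2.2 + 1))
        = (if j = iN then s else stepA s (nums.getD j 0)) := by
      intro s j _
      simp [stepA, PySem.List.pyGetD_natCast]
    rw [PySem.List.foldl_congr_mem _ _ _ _ hb]
    exact foldl_skip_eraseIdx stepA nums iN hiN _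
  have hout : ∀ (acc : Int), ∀ iN ∈ List.range nums.length,
      (fun (acc : Int) (iN : Nat) =>
        if (List.foldl (fun (s : Int × Int × Int) (j : Nat) =>
              if (j : Int) = (iN : Int) then s
              else if PySem.Int.mod s.2.2 2 = 0 then (s.1 + PySem.List.pyGetD nums (j : Int) 0, s.2.1, s.2.2 + 1)
              else (s.1, s.2.1 + PySem.List.pyGetD nums (j : Int) 0, s.2.2 + 1)) ((0 : Int), (0 : Int), (0 : Int))
              (List.range nums.length)).1
            = (List.foldl (fun (s : Int × Int × Int) (j : Nat) =>
              if (j : Int) = (iN : Int) then s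
              else if PySem.Int.mod s.2.2 2 = 0 then (s.1 + PySem.List.pyGetD nums (j : Int) 0, s.2.1, s.2.2 + 1)
              else (s.1, s.2.1 + PySem.List.pyGetD nums (j : Int) 0, s.2.2 + 1)) ((0 : Int), (0 : Int), (0 : Int))
              (List.range nums.length)).2.1
        then acc + 1 else acc) acc iN
      = (if (fun iN => decide ((swapAdd (nums.eraseIdx iN)).1 = (swapAdd (nums.eraseIdx iN)).2)) iN = true
         then acc + 1 else acc) := by
    intro acc iN hiN
    have hiN' : iN < nums.length := List.mem_range.mp hiN
    simp only [hinner iN hiN', stepA_fold, if_pos (show (0 : Int) % 2 = 0 from rfl),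
      Int.zero_add, decide_eq_true_eq]
  rw [PySem.List.foldl_congr_mem _ _ _ _ hout, PySem.List.foldl_count_if]
  ring

lemma B_eq_count (nums : List Int) (h : nums.length ≠ 0) :
    minimum_increment_ops_elems_odd_even_brute_force_alt nums
      = ((List.range nums.length).countP (predQ nums (swapAdd nums).1 (swapAdd nums).2) : Nat) := by
  have htots : (PySem.List.enumerate nums 0).foldl (fun (t : Int × Int) kx =>
        if PySem.Int.mod kx.1 2 = 0 then (t.1 + kx.2, t.2) else (t.1, t.2 + kx.2)) ((0 : Int), (0 : Int))
      = ((swapAdd nums).1, (swapAdd nums).2) := by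
    rw [tots_fold]
    norm_num
  have hfold := B_fold nums (swapAdd nums).1 (swapAdd nums).2 nums.length 0 (by omega) 0
  unfold minimum_increment_ops_elems_odd_even_brute_force_alt
  rw [if_neg h]
  simp only [htots]
  show ((PySem.List.enumerate nums 0).foldl (stepB (swapAdd nums).1 (swapAdd nums).2)
      ((0 : Int), (0 : Int), (0 : Int))).1 = _
  simpa [swapAdd, List.range_eq_range'] using hfold

-- ===== VERDICT (by name: the statement is the Claim_ definition above) =====
theorem minimum_increment_ops_elems_odd_even_brute_force_spec : Claim_equal_minimum_increment_ops_elems_odd_even_brute_force := by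
  intro nums _
  unfold Spec_minimum_increment_ops_elems_odd_even_brute_force
  by_cases h : nums.length = 0
  · unfold minimum_increment_ops_elems_odd_even_brute_force minimum_increment_ops_elems_odd_even_brute_force_alt
    rw [if_pos h, if_pos h]
  · rw [A_eq_count nums h, B_eq_count nums h]
    congr 1
    apply List.countP_congr
    intro k hkm
    have hk : k < nums.length := List.mem_range.mp hkm
    rw [pred_eq nums k hk]
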